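-- pv_equiv track=rewrite | github.com/Yoobuu/Kylow | backend/app/ai/normalizers/hyperv.py | _classify_env
-- ===== SOURCE A (Python) =====
-- from typing import Any, Dict, Iterable, List, Optional
--
-- def _classify_env(value: Optional[str]) -> Optional[str]:
--     if not value:
--         return None
--     cleaned = str(value).strip().upper()
--     if not cleaned:
--         return None
--     tokens = [token for token in cleaned.replace("-", " ").replace("_", " ").split() if token]
--     for token in tokens:
--         first = token[:1]
--         if first == "S":
--             return "sandbox"
--         if first == "T":
--             return "test"
--         if first == "P":
--             return "produccion"
--         if first == "D":
--             return "desarrollo"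
--     return None
-- ===== SOURCE B (Python) =====
-- from typing import Optional
--
-- _ENV_MAP = {"S": "sandbox", "T": "test", "P": "produccion", "D": "desarrollo"}
--
-- def _classify_env(value: Optional[str]) -> Optional[str]:
--     if not value:
--         return None
--     prev_sep = True
--     for ch in str(value):
--         if ch.isspace() or ch in "-_":
--             prev_sep = True
--         else:
--             if prev_sep:
--                 c = ch.upper()
--                 if c in _ENV_MAP:
--                     return _ENV_MAP[c]
--             prev_sep = False
--     return None
-- ===== Notes on version B (the rewrite author's own statement) =====
-- stated objective: idiomatic
-- what changed: A normalizes the string (strip/upper), rewrites hyphens and underscores to spaces, splits it into a token list and then loops over the tokens; B makes one left-to-right pass over the raw string, tracking a token-start flag and classifying the upper-cased first letter of each token via a small dict, with no intermediate strings or token list.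
import Mathlib
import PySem

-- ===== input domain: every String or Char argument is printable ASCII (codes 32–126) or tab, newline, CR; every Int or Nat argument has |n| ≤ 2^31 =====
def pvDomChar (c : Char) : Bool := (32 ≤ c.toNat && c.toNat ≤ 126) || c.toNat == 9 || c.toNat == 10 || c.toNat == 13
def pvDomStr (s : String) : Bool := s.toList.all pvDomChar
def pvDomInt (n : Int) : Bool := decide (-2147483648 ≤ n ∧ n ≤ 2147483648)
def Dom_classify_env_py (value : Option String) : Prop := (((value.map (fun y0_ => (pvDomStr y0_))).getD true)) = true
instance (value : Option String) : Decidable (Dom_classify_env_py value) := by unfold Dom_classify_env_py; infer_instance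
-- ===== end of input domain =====

-- B replaces A's clean/replace/split/scan token pipeline by a single left-to-right pass that
-- tracks whether it stands at a token start (idiomatic single pass; no speed claim).

-- ===== PORT A =====
-- A's `for token in tokens` loop with its early-return branch chain.
def pvTokLoopA : List (List Char) → Option String
  | [] => none
  | token :: rest =>
    let first := PySem.Chars.slice token none (some 1)   -- token[:1]
    if first = ['S'] then some "sandbox"
    else if first = ['T'] then some "test"
    else if first = ['P'] then some "produccion"
    else if first = ['D'] then some "desarrollo"
    else pvTokLoopA rest

def classify_env_py (value : Option String) : Option String :=
  match value with
  | none => none                                          -- `if not value: return None`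
  | some v =>
    if v.toList = [] then none                            -- `if not value` for the empty string
    else
      let cleaned := PySem.Chars.upper (PySem.Chars.strip v.toList)
      if cleaned = [] then none                           -- `if not cleaned: return None`
      else
        let tokens :=
          (PySem.Chars.split₀
            (PySem.Chars.replace (PySem.Chars.replace cleaned ['-'] [' ']) ['_'] [' '])).filter
              (fun t => !t.isEmpty)                       -- `[token for token in ….split() if token]`
        pvTokLoopA tokens

-- ===== PORT B =====
def pvEnvMap : PySem.Dict Char String :=
  PySem.Dict.ofList [('S', "sandbox"), ('T', "test"), ('P', "produccion"), ('D', "desarrollo")]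

-- `ch.isspace() or ch == "-" or ch == "_"`
def pvSepB (c : Char) : Bool := PySem.Chars.isspace c || c == '-' || c == '_'

-- B's single pass: `prev_sep` is the second argument.
def pvScanB : List Char → Bool → Option String
  | [], _ => none
  | c :: t, prevSep =>
    if pvSepB c then pvScanB t true
    else if prevSep then
      match pvEnvMap.get? (PySem.Chars.upperChar c) with   -- `c = ch.upper(); if c in _ENV_MAP: return _ENV_MAP[c]`
      | some r => some r
      | none => pvScanB t false
    else pvScanB t false

def classify_env_py_alt (value : Option String) : Option String :=
  match value with
  | none => none
  | some v =>
    if v.toList = [] then none                            -- `if not value: return None`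
    else pvScanB v.toList true

-- ===== PRECONDITION & SPEC =====
def Spec_classify_env_py (value : Option String) (out : Option String) : Prop := out = classify_env_py_alt value
instance (value : Option String) (out : Option String) : Decidable (Spec_classify_env_py value out) := by unfold Spec_classify_env_py; infer_instance

-- ===== CLAIM (what is proved, stated in full; the proofs are below) =====
def Claim_equal_classify_env_py : Prop := ∀ (value : Option String), Dom_classify_env_py value → Spec_classify_env_py value (classify_env_py value)

-- ===== LEMMAS AND PROOFS =====

-- proof-side helpers
def pvClassify (c : Char) : Option String :=
  if c = 'S' then some "sandbox" else if c = 'T' then some "test"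
  else if c = 'P' then some "produccion" else if c = 'D' then some "desarrollo" else none

def pvHeadClass : List Char → Option String
  | [] => none
  | c :: _ => pvClassify c

-- the midpoint scanner: B's pass with the per-char upper-casing already applied
def pvScanNU : List Char → Bool → Option String
  | [], _ => none
  | c :: t, f =>
    if pvSepB c then pvScanNU t true
    else if f then (pvClassify c).or (pvScanNU t false) else pvScanNU t false

def pvRep (c : Char) : Char := if c = '-' then ' ' else if c = '_' then ' ' else c

-- ---- character-level facts ----
theorem pv_isspace_upperChar (c : Char) :
    PySem.Chars.isspace (PySem.Chars.upperChar c) = PySem.Chars.isspace c := by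
  simp only [PySem.Chars.upperChar]
  by_cases h : PySem.Chars.islower c = true
  · simp only [h, if_pos]
    have hc : 97 ≤ c.toNat ∧ c.toNat ≤ 122 := by
      simp only [PySem.Chars.islower, Bool.and_eq_true, decide_eq_true_eq, Char.le_def] at h
      exact ⟨h.1, h.2⟩
    have hv : (c.toNat - 32).isValidChar := by left; omega
    have ht : (Char.ofNat (c.toNat - 32)).toNat = c.toNat - 32 := by simp [Char.ofNat, hv]
    have hL : PySem.Chars.isspace (Char.ofNat (c.toNat - 32)) = false := by
      simp only [PySem.Chars.isspace, ht, Bool.or_eq_false_iff, Bool.and_eq_false_iff,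
        decide_eq_false_iff_not]
      omega
    have hR : PySem.Chars.isspace c = false := by
      simp only [PySem.Chars.isspace, Bool.or_eq_false_iff, Bool.and_eq_false_iff,
        decide_eq_false_iff_not]
      omega
    rw [hL, hR]
  · simp [h]

theorem pv_upperChar_eq_iff (c d : Char)
    (hd : (d.toNat < 65 ∨ 90 < d.toNat) ∧ (d.toNat < 97 ∨ 122 < d.toNat)) :
    (PySem.Chars.upperChar c = d) = (c = d) := by
  simp only [PySem.Chars.upperChar]
  by_cases h : PySem.Chars.islower c = true
  · simp only [h, if_pos]
    have hc : 97 ≤ c.toNat ∧ c.toNat ≤ 122 := by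
      simp only [PySem.Chars.islower, Bool.and_eq_true, decide_eq_true_eq, Char.le_def] at h
      exact ⟨h.1, h.2⟩
    have hv : (c.toNat - 32).isValidChar := by left; omega
    have ht : (Char.ofNat (c.toNat - 32)).toNat = c.toNat - 32 := by simp [Char.ofNat, hv]
    have h1 : Char.ofNat (c.toNat - 32) ≠ d := by
      intro he; have := congrArg Char.toNat he; rw [ht] at this; omega
    have h2 : c ≠ d := by
      intro he; have := congrArg Char.toNat he; omega
    simp [h1, h2]
  · simp [h]

theorem pv_sepB_upperChar (c : Char) : pvSepB (PySem.Chars.upperChar c) = pvSepB c := by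
  by_cases h1 : c = '-'
  · subst h1; decide
  by_cases h2 : c = '_'
  · subst h2; decide
  · have n1 : PySem.Chars.upperChar c ≠ '-' := fun he =>
      h1 ((pv_upperChar_eq_iff c '-' (by decide)) ▸ he)
    have n2 : PySem.Chars.upperChar c ≠ '_' := fun he =>
      h2 ((pv_upperChar_eq_iff c '_' (by decide)) ▸ he)
    have b1 : (PySem.Chars.upperChar c == '-') = false := by simp [n1]
    have b2 : (PySem.Chars.upperChar c == '_') = false := by simp [n2]
    have b3 : (c == '-') = false := by simp [h1]
    have b4 : (c == '_') = false := by simp [h2]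
    simp [pvSepB, pv_isspace_upperChar, b1, b2, b3, b4]

theorem pv_isspace_pvRep (c : Char) : PySem.Chars.isspace (pvRep c) = pvSepB c := by
  by_cases h1 : c = '-'
  · subst h1; decide
  by_cases h2 : c = '_'
  · subst h2; decide
  · have b3 : (c == '-') = false := by simp [h1]
    have b4 : (c == '_') = false := by simp [h2]
    simp [pvRep, pvSepB, h1, h2, b3, b4]

theorem pv_pvRep_of_not_sep (c : Char) (h : pvSepB c = false) : pvRep c = c := by
  simp only [pvSepB, Bool.or_eq_false_iff, beq_eq_false_iff_ne, ne_eq] at h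
  simp [pvRep, h.1.2, h.2]

theorem pv_envMap_get (c : Char) : pvEnvMap.get? c = pvClassify c := by
  by_cases h1 : c = 'S'
  · subst h1; decide
  by_cases h2 : c = 'T'
  · subst h2; decide
  by_cases h3 : c = 'P'
  · subst h3; decide
  by_cases h4 : c = 'D'
  · subst h4; decide
  · have hmk : pvEnvMap = PySem.Dict.mk [('S', "sandbox"), ('T', "test"), ('P', "produccion"), ('D', "desarrollo")] := by
      apply PySem.Dict.ext; decide
    rw [hmk]
    simp only [PySem.Dict.get?, pvClassify, h1, h2, h3, h4, if_false]
    have b1 : ('S' == c) = false := by simp [Ne.symm h1]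
    have b2 : ('T' == c) = false := by simp [Ne.symm h2]
    have b3 : ('P' == c) = false := by simp [Ne.symm h3]
    have b4 : ('D' == c) = false := by simp [Ne.symm h4]
    simp [List.find?, b1, b2, b3, b4]

-- ---- B's scanner vs the midpoint scanner ----
theorem pv_scanB_eq_scanNU_upper : ∀ (s : List Char) (f : Bool),
    pvScanB s f = pvScanNU (PySem.Chars.upper s) f := by
  intro s
  induction s with
  | nil => intro f; rfl
  | cons c t ih =>
    intro f
    simp only [PySem.Chars.upper, List.map_cons, pvScanB, pvScanNU, pv_sepB_upperChar]
    by_cases hs : pvSepB c = true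
    · simp only [hs, if_pos]
      simpa [PySem.Chars.upper] using ih true
    · simp only [Bool.not_eq_true] at hs
      simp only [hs, Bool.false_eq_true, if_false]
      by_cases hf : f = true
      · simp only [hf, if_pos, pv_envMap_get]
        cases hc : pvClassify (PySem.Chars.upperChar c) with
        | some r => simp [Option.or]
        | none => simp only [Option.or]; simpa [PySem.Chars.upper] using ih false
      · simp only [Bool.not_eq_true] at hf
        simp only [hf, Bool.false_eq_true, if_false]
        simpa [PySem.Chars.upper] using ih false

-- ---- stripping does not change B's scan ----
theorem pv_scanB_spaces : ∀ (ys : List Char) (f : Bool),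
    (∀ c ∈ ys, PySem.Chars.isspace c = true) → pvScanB ys f = none := by
  intro ys
  induction ys with
  | nil => intro f _; rfl
  | cons c t ih =>
    intro f h
    have hc : pvSepB c = true := by
      simp [pvSepB, h c (List.mem_cons_self)]
    simp only [pvScanB, hc, if_pos]
    exact ih true (fun d hd => h d (List.mem_cons_of_mem _ hd))

theorem pv_scanB_append : ∀ (xs ys : List Char) (f : Bool),
    pvScanB (xs ++ ys) f =
      match pvScanB xs f with
      | some r => some r
      | none => pvScanB ys (xs.foldl (fun _ c => pvSepB c) f) := by
  intro xs
  induction xs with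
  | nil => intro ys f; rfl
  | cons c t ih =>
    intro ys f
    simp only [List.cons_append, pvScanB, List.foldl_cons]
    by_cases hs : pvSepB c = true
    · simp only [hs, if_pos]; exact ih ys true
    · simp only [Bool.not_eq_true] at hs
      simp only [hs, Bool.false_eq_true, if_false]
      by_cases hf : f = true
      · simp only [hf, if_pos]
        cases hc : pvEnvMap.get? (PySem.Chars.upperChar c) with
        | some r => rfl
        | none => exact ih ys false
      · simp only [Bool.not_eq_true] at hf
        simp only [hf, Bool.false_eq_true, if_false]
        exact ih ys false

theorem pv_scanB_lstrip : ∀ (s : List Char),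
    pvScanB (List.dropWhile PySem.Chars.isspace s) true = pvScanB s true := by
  intro s
  induction s with
  | nil => rfl
  | cons c t ih =>
    by_cases h : PySem.Chars.isspace c = true
    · have hc : pvSepB c = true := by simp [pvSepB, h]
      simp only [List.dropWhile_cons, h, if_pos, pvScanB, hc]
      exact ih
    · simp only [Bool.not_eq_true] at h
      simp [h]

theorem pv_scanB_rstrip (l : List Char) :
    pvScanB (PySem.Chars.rstrip l) true = pvScanB l true := by
  have hdec : l = (List.dropWhile PySem.Chars.isspace l.reverse).reverse ++
      (List.takeWhile PySem.Chars.isspace l.reverse).reverse := by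
    conv_lhs => rw [← List.reverse_reverse l,
      ← List.takeWhile_append_dropWhile (p := PySem.Chars.isspace) (l := l.reverse)]
    rw [List.reverse_append]
  have htail : ∀ c ∈ (List.takeWhile PySem.Chars.isspace l.reverse).reverse,
      PySem.Chars.isspace c = true := by
    intro c hc
    rw [List.mem_reverse] at hc
    exact List.mem_takeWhile_imp hc
  conv_rhs => rw [hdec]
  rw [pv_scanB_append]
  rw [pv_scanB_spaces _ _ htail]
  simp only [PySem.Chars.rstrip]
  cases pvScanB (List.dropWhile PySem.Chars.isspace l.reverse).reverse true <;> rfl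

theorem pv_scanB_strip (s : List Char) :
    pvScanB (PySem.Chars.strip s) true = pvScanB s true := by
  simp only [PySem.Chars.strip]
  rw [pv_scanB_rstrip, PySem.Chars.lstrip, pv_scanB_lstrip]

-- ---- A's replace chain is a character map ----
theorem pv_replace_go_single : ∀ (l : List Char) (o n : Char) (fuel : Nat) (acc : List Char),
    l.length ≤ fuel →
    PySem.Chars.replace.go [o] [n] fuel l acc =
      acc.reverse ++ l.map (fun c => if c = o then n else c) := by
  intro l
  induction l with
  | nil =>
    intro o n fuel acc _
    cases fuel <;> simp [PySem.Chars.replace.go]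
  | cons c t ih =>
    intro o n fuel acc hlen
    cases fuel with
    | zero => simp at hlen
    | succ m =>
      simp only [PySem.Chars.replace.go]
      by_cases hco : c = o
      · subst hco
        have hpre : [c].isPrefixOf (c :: t) = true := by
          simp [List.isPrefixOf]
        have hd : List.drop ([c] : List Char).length (c :: t) = t := by simp
        have hr : ([n] : List Char).reverse ++ acc = n :: acc := by simp
        simp only [hpre, if_pos, hd, hr]
        rw [ih c n m (n :: acc) (by simpa using Nat.lt_succ_iff.mp (by simpa using hlen))]
        simp
      · have hpre : [o].isPrefixOf (c :: t) = false := by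
          simp [List.isPrefixOf]
          exact fun he => absurd he.symm hco
        simp only [hpre, Bool.false_eq_true, if_false]
        rw [ih o n m (c :: acc) (by simpa using Nat.lt_succ_iff.mp (by simpa using hlen))]
        simp [hco]

theorem pv_replace_single (s : List Char) (o n : Char) :
    PySem.Chars.replace s [o] [n] = s.map (fun c => if c = o then n else c) := by
  simp only [PySem.Chars.replace, List.isEmpty_cons, Bool.false_eq_true, if_false]
  simpa using pv_replace_go_single s o n s.length [] (le_refl _)

theorem pv_rep2 (u : List Char) :
    PySem.Chars.replace (PySem.Chars.replace u ['-'] [' ']) ['_'] [' '] = u.map pvRep := by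
  rw [pv_replace_single, pv_replace_single, List.map_map]
  apply List.map_congr_left
  intro c _
  by_cases h1 : c = '-'
  · subst h1; rfl
  · by_cases h2 : c = '_'
    · subst h2; rfl
    · simp [pvRep, h1, h2, Function.comp]

-- ---- A's token loop ----
theorem pv_tokLoopA_cons (t : List Char) (rest : List (List Char)) :
    pvTokLoopA (t :: rest) = (pvHeadClass t).or (pvTokLoopA rest) := by
  cases t with
  | nil =>
    simp [pvTokLoopA, pvHeadClass, PySem.List.slice_to (xs := ([] : List Char)) (b := 1) (by norm_num)]
  | cons c tt =>
    have hsl : PySem.Chars.slice (c :: tt) none (some 1) = [c] := by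
      rw [PySem.Chars.slice_eq_listSlice, PySem.List.slice_to (xs := c :: tt) (b := 1) (by norm_num)]
      simp
    simp only [pvTokLoopA, hsl, pvHeadClass, pvClassify]
    by_cases h1 : c = 'S'
    · simp [h1, Option.or]
    by_cases h2 : c = 'T'
    · simp [h2, Option.or]
    by_cases h3 : c = 'P'
    · simp [h3, Option.or]
    by_cases h4 : c = 'D'
    · simp [h4, Option.or]
    · simp [h1, h2, h3, h4, Option.or]

theorem pv_tokLoopA_append (xs ys : List (List Char)) :
    pvTokLoopA (xs ++ ys) = (pvTokLoopA xs).or (pvTokLoopA ys) := by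
  induction xs with
  | nil => simp [pvTokLoopA, Option.or]
  | cons t rest ih =>
    rw [List.cons_append, pv_tokLoopA_cons, pv_tokLoopA_cons, ih, Option.or_assoc]

theorem pv_headClass_append (l : List Char) (c : Char) (h : l ≠ []) :
    pvHeadClass (l ++ [c]) = pvHeadClass l := by
  cases l with
  | nil => exact absurd rfl h
  | cons d ds => rfl

-- ---- the split₀ loop vs the midpoint scanner ----
theorem pv_headClass_nil : pvHeadClass [] = none := rfl

theorem pv_headClass_cons (c : Char) (l : List Char) : pvHeadClass (c :: l) = pvClassify c := rfl

theorem pv_splitGo_scan : ∀ (s cur : List Char) (acc : List (List Char)),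
    pvTokLoopA ((PySem.Chars.split₀.go (s.map pvRep) cur acc).filter (fun t => !t.isEmpty)) =
      (pvTokLoopA (acc.reverse.filter (fun t => !t.isEmpty))).or
        ((pvHeadClass cur.reverse).or (pvScanNU s cur.isEmpty)) := by
  intro s
  induction s with
  | nil =>
    intro cur acc
    cases cur with
    | nil =>
      simp only [List.map_nil, PySem.Chars.split₀.go, List.isEmpty_nil, if_pos, pvScanNU,
        pvHeadClass, List.reverse_nil, Option.or_none]
    | cons c cs =>
      have hf : (cs.reverse ++ [c]).isEmpty = false := List.isEmpty_eq_false_iff.mpr (by simp)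
      simp only [List.map_nil, PySem.Chars.split₀.go, List.isEmpty_cons, Bool.false_eq_true,
        if_false, List.reverse_cons, pvScanNU]
      rw [List.filter_append, pv_tokLoopA_append, List.filter_cons]
      simp only [hf, Bool.not_false, if_pos, List.filter_nil]
      rw [pv_tokLoopA_cons]
      simp only [pvTokLoopA, Option.or_none]
  | cons c t ih =>
    intro cur acc
    simp only [List.map_cons, PySem.Chars.split₀.go, pv_isspace_pvRep]
    by_cases hs : pvSepB c = true
    · simp only [hs, if_pos]
      cases cur with
      | nil =>
        simp only [List.isEmpty_nil, if_pos]
        rw [ih [] acc]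
        simp only [List.reverse_nil, pv_headClass_nil, Option.none_or, List.isEmpty_nil,
          pvScanNU, hs, if_pos]
      | cons d ds =>
        have hf : (ds.reverse ++ [d]).isEmpty = false := List.isEmpty_eq_false_iff.mpr (by simp)
        simp only [List.isEmpty_cons, Bool.false_eq_true, if_false]
        rw [ih [] ((d :: ds).reverse :: acc)]
        simp only [List.reverse_cons, List.filter_append, pv_tokLoopA_append, List.reverse_nil,
          pv_headClass_nil, Option.none_or, List.isEmpty_nil]
        rw [List.filter_cons]
        simp only [hf, Bool.not_false, if_pos, List.filter_nil]
        rw [pv_tokLoopA_cons]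
        simp only [pvTokLoopA, Option.or_none, Option.or_assoc]
        simp only [pvScanNU, hs, if_pos]
    · simp only [Bool.not_eq_true] at hs
      rw [pv_pvRep_of_not_sep c hs]
      simp only [hs, Bool.false_eq_true, if_false]
      rw [ih (c :: cur) acc]
      cases cur with
      | nil =>
        simp only [List.reverse_cons, List.reverse_nil, List.nil_append, pv_headClass_nil,
          List.isEmpty_cons, List.isEmpty_nil, pvScanNU, hs, Bool.false_eq_true, if_false,
          if_pos, Option.none_or, pv_headClass_cons]
      | cons d ds =>
        have hne : (d :: ds).reverse ≠ [] := by simp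
        rw [List.reverse_cons, pv_headClass_append _ _ hne]
        simp only [pvScanNU, hs, Bool.false_eq_true, if_false, List.isEmpty_cons]

theorem pv_Aloop_eq (u : List Char) :
    pvTokLoopA ((PySem.Chars.split₀ (u.map pvRep)).filter (fun t => !t.isEmpty)) =
      pvScanNU u true := by
  rw [PySem.Chars.split₀, pv_splitGo_scan u [] []]
  simp [pvTokLoopA, pvHeadClass, Option.or]

-- B's scan equals the midpoint scan of the cleaned string
theorem pv_scanB_eq_cleaned (cs : List Char) :
    pvScanB cs true = pvScanNU (PySem.Chars.upper (PySem.Chars.strip cs)) true := by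
  rw [← pv_scanB_eq_scanNU_upper, pv_scanB_strip]

-- ===== VERDICT (by name: the statement is the Claim_ definition above) =====
theorem classify_env_py_spec : Claim_equal_classify_env_py := by
  intro value _
  unfold Spec_classify_env_py
  cases value with
  | none => rfl
  | some v =>
    simp only [classify_env_py, classify_env_py_alt]
    by_cases hv : v.toList = []
    · simp [hv]
    · simp only [hv, if_false]
      by_cases hc : PySem.Chars.upper (PySem.Chars.strip v.toList) = []
      · simp only [hc, if_pos]
        rw [pv_scanB_eq_cleaned, hc]
        rfl
      · simp only [hc, if_false]
        rw [pv_rep2, pv_Aloop_eq, pv_scanB_eq_cleaned]
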